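-- pv_equiv track=rewrite | github.com/jclements3/HarpHymnal | legacy/tools/harp_mapper.py | cycle_of_transition
-- ===== SOURCE A (Python) =====
-- def cycle_of_transition(deg_from, deg_to):
--     """Return ('2nds'|'3rds'|'4ths', 'CW'|'CCW') or None if not a cycle edge.
--     CW/CCW is determined by the cycle's traversal order.
--     cycle_4ths_cw: I IV vii° iii vi ii V I  (step = +3 in degree)
--     cycle_3rds_cw: I iii V vii° ii IV vi I  (step = +2)
--     cycle_2nds_cw: I ii iii IV V vi vii° I  (step = +1)
--     """
--     if deg_from is None or deg_to is None or deg_from == deg_to: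
--         return None, None
--     # Distance in diatonic degrees (1-7 wraps)
--     forward = (deg_to - deg_from) % 7
--     backward = (deg_from - deg_to) % 7
--     # CW traversals
--     cw_traversals = {
--         '2nds': [1, 2, 3, 4, 5, 6, 7],    # step forward by 1
--         '3rds': [1, 3, 5, 7, 2, 4, 6],    # step forward by 2
--         '4ths': [1, 4, 7, 3, 6, 2, 5],    # step forward by 3
--     }
--     for cyc, order in cw_traversals.items():
--         # If deg_to comes right after deg_from in CW order, it's CW
--         try:
--             idx_from = order.index(deg_from)
--             idx_to = order.index(deg_to)
--             # CW: +1 step in order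
--             if (idx_to - idx_from) % 7 == 1:
--                 return cyc, 'CW'
--             # CCW: -1 step in order
--             if (idx_from - idx_to) % 7 == 1:
--                 return cyc, 'CCW'
--         except ValueError:
--             continue
--     return None, None
-- ===== SOURCE B (Python) =====
-- def cycle_of_transition(deg_from, deg_to):
--     if deg_from is None or deg_to is None or deg_from == deg_to:
--         return None, None
--     if deg_from not in {1, 2, 3, 4, 5, 6, 7} or deg_to not in {1, 2, 3, 4, 5, 6, 7}:
--         return None, None
--     table = {1: ('2nds', 'CW'), 6: ('2nds', 'CCW'),
--              2: ('3rds', 'CW'), 5: ('3rds', 'CCW'),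
--              3: ('4ths', 'CW'), 4: ('4ths', 'CCW')}
--     return table[(deg_to - deg_from) % 7]
-- ===== Notes on version B (the rewrite author's own statement) =====
-- stated objective: simpler
-- what changed: Replaces the loop over three cycle orders with two .index scans and modular index arithmetic per cycle by a single validity check of both degrees against 1..7 and one (deg_to - deg_from) % 7 lookup in a fixed six-entry table; no loops or .index calls remain.
import Mathlib
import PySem

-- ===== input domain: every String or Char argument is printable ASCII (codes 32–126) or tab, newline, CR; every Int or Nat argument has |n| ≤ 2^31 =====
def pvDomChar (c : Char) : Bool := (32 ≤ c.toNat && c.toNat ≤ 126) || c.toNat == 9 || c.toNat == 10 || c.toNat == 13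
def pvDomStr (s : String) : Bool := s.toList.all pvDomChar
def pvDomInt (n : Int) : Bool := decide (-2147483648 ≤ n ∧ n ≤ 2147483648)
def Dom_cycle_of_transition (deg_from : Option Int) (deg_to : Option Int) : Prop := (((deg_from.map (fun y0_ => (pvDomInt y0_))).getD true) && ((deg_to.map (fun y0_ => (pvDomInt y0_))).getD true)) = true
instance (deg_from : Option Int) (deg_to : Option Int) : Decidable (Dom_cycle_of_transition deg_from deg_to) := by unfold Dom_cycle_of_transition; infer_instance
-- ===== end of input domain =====

-- B replaces A's loop over the three cycle orders with index lookups by a single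
-- (deg_to - deg_from) % 7 computation and a fixed six-entry table (simpler, no loops).

-- ===== PORT A =====
-- the loop over cw_traversals.items(): try both .index lookups, classify, else continue
def cycleLoopA (a b : Int) : List (String × List Int) → Option String × Option String
  | [] => (none, none)
  | (cyc, order) :: rest =>
    match PySem.List.index? order a, PySem.List.index? order b with
    | some i, some j =>
      if PySem.Int.mod ((j : Int) - (i : Int)) 7 = 1 then (some cyc, some "CW")
      else if PySem.Int.mod ((i : Int) - (j : Int)) 7 = 1 then (some cyc, some "CCW")
      else cycleLoopA a b rest
    | _, _ => cycleLoopA a b rest    -- ValueError: continue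

def cycle_of_transition (deg_from : Option Int) (deg_to : Option Int) : Option String × Option String :=
  match deg_from, deg_to with
  | none, _ => (none, none)
  | _, none => (none, none)
  | some a, some b =>
    if a = b then (none, none)
    else
      -- `forward`/`backward` are computed in A but unused by the loop; kept as in A
      let _forward := PySem.Int.mod (b - a) 7
      let _backward := PySem.Int.mod (a - b) 7
      cycleLoopA a b
        [("2nds", [1, 2, 3, 4, 5, 6, 7]),
         ("3rds", [1, 3, 5, 7, 2, 4, 6]),
         ("4ths", [1, 4, 7, 3, 6, 2, 5])]

-- ===== PORT B =====
def cycle_of_transition_alt (deg_from : Option Int) (deg_to : Option Int) : Option String × Option String :=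
  match deg_from, deg_to with
  | none, _ => (none, none)
  | _, none => (none, none)
  | some a, some b =>
    if a = b then (none, none)
    else if ¬ (PySem.Set.ofList ([1, 2, 3, 4, 5, 6, 7] : List Int)).contains a
            ∨ ¬ (PySem.Set.ofList ([1, 2, 3, 4, 5, 6, 7] : List Int)).contains b then
      (none, none)
    else
      let table : PySem.Dict Int (Option String × Option String) :=
        PySem.Dict.ofList
          [(1, (some "2nds", some "CW")), (6, (some "2nds", some "CCW")),
           (2, (some "3rds", some "CW")), (5, (some "3rds", some "CCW")),
           (3, (some "4ths", some "CW")), (4, (some "4ths", some "CCW"))]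
      -- table[(deg_to - deg_from) % 7]: the key is always present here (KeyError impossible)
      (table.get? (PySem.Int.mod (b - a) 7)).getD (none, none)

-- ===== PRECONDITION & SPEC =====
def Spec_cycle_of_transition (deg_from : Option Int) (deg_to : Option Int) (out : Option String × Option String) : Prop := out = cycle_of_transition_alt deg_from deg_to
instance (deg_from : Option Int) (deg_to : Option Int) (out : Option String × Option String) : Decidable (Spec_cycle_of_transition deg_from deg_to out) := by unfold Spec_cycle_of_transition; infer_instance

-- ===== CLAIM (what is proved, stated in full; the proofs are below) =====
def Claim_equal_cycle_of_transition : Prop := ∀ (deg_from : Option Int) (deg_to : Option Int), Dom_cycle_of_transition deg_from deg_to → Spec_cycle_of_transition deg_from deg_to (cycle_of_transition deg_from deg_to)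

-- ===== LEMMAS AND PROOFS =====

-- if a is not a degree 1..7, every .index lookup fails and the loop falls through
lemma cycleLoopA_left_none (a b : Int)
    (ha1 : PySem.List.index? ([1, 2, 3, 4, 5, 6, 7] : List Int) a = none)
    (ha2 : PySem.List.index? ([1, 3, 5, 7, 2, 4, 6] : List Int) a = none)
    (ha3 : PySem.List.index? ([1, 4, 7, 3, 6, 2, 5] : List Int) a = none) :
    cycleLoopA a b
      [("2nds", [1, 2, 3, 4, 5, 6, 7]),
       ("3rds", [1, 3, 5, 7, 2, 4, 6]),
       ("4ths", [1, 4, 7, 3, 6, 2, 5])] = (none, none) := by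
  simp only [PySem.List.index?_eq_idxOf?] at ha1 ha2 ha3
  simp [cycleLoopA, ha1, ha2, ha3]

lemma cycleLoopA_right_none (a b : Int)
    (hb1 : PySem.List.index? ([1, 2, 3, 4, 5, 6, 7] : List Int) b = none)
    (hb2 : PySem.List.index? ([1, 3, 5, 7, 2, 4, 6] : List Int) b = none)
    (hb3 : PySem.List.index? ([1, 4, 7, 3, 6, 2, 5] : List Int) b = none) :
    cycleLoopA a b
      [("2nds", [1, 2, 3, 4, 5, 6, 7]),
       ("3rds", [1, 3, 5, 7, 2, 4, 6]),
       ("4ths", [1, 4, 7, 3, 6, 2, 5])] = (none, none) := by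
  unfold cycleLoopA
  rw [hb1]
  cases PySem.List.index? ([1, 2, 3, 4, 5, 6, 7] : List Int) a <;>
    · unfold cycleLoopA
      rw [hb2]
      cases PySem.List.index? ([1, 3, 5, 7, 2, 4, 6] : List Int) a <;>
        · unfold cycleLoopA
          rw [hb3]
          cases PySem.List.index? ([1, 4, 7, 3, 6, 2, 5] : List Int) a <;> rfl

lemma key_lemma (a b : Int) :
    cycle_of_transition (some a) (some b) = cycle_of_transition_alt (some a) (some b) := by
  by_cases hab : a = b
  · simp [cycle_of_transition, cycle_of_transition_alt, hab]
  · by_cases ha : a ∈ ([1, 2, 3, 4, 5, 6, 7] : List Int)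
    · by_cases hb : b ∈ ([1, 2, 3, 4, 5, 6, 7] : List Int)
      · -- both in 1..7: finite case analysis
        simp only [List.mem_cons, List.not_mem_nil, or_false] at ha hb
        rcases ha with rfl | rfl | rfl | rfl | rfl | rfl | rfl <;>
          rcases hb with rfl | rfl | rfl | rfl | rfl | rfl | rfl <;>
          first | (exact absurd rfl hab) | decide
      · have h1 : b ∉ ([1, 2, 3, 4, 5, 6, 7] : List Int) := hb
        have h2 : b ∉ ([1, 3, 5, 7, 2, 4, 6] : List Int) := by
          simp only [List.mem_cons] at h1 ⊢; tauto
        have h3 : b ∉ ([1, 4, 7, 3, 6, 2, 5] : List Int) := by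
          simp only [List.mem_cons] at h1 ⊢; tauto
        rw [← PySem.List.index?_eq_none_iff] at h1 h2 h3
        simp only [cycle_of_transition, cycle_of_transition_alt, if_neg hab]
        rw [cycleLoopA_right_none a b h1 h2 h3]
        have hbc : ¬ (PySem.Set.ofList ([1, 2, 3, 4, 5, 6, 7] : List Int)).contains b = true := by
          intro hc
          exact hb (by simpa [PySem.Set.mem_ofList] using hc)
        rw [if_pos (Or.inr hbc)]
    · have h1 : a ∉ ([1, 2, 3, 4, 5, 6, 7] : List Int) := ha
      have h2 : a ∉ ([1, 3, 5, 7, 2, 4, 6] : List Int) := by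
        simp only [List.mem_cons] at h1 ⊢; tauto
      have h3 : a ∉ ([1, 4, 7, 3, 6, 2, 5] : List Int) := by
        simp only [List.mem_cons] at h1 ⊢; tauto
      rw [← PySem.List.index?_eq_none_iff] at h1 h2 h3
      simp only [cycle_of_transition, cycle_of_transition_alt, if_neg hab]
      rw [cycleLoopA_left_none a b h1 h2 h3]
      have hac : ¬ (PySem.Set.ofList ([1, 2, 3, 4, 5, 6, 7] : List Int)).contains a = true := by
        intro hc
        exact ha (by simpa [PySem.Set.mem_ofList] using hc)
      rw [if_pos (Or.inl hac)]

-- ===== VERDICT (by name: the statement is the Claim_ definition above) =====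
theorem cycle_of_transition_spec : Claim_equal_cycle_of_transition := by
  intro deg_from deg_to _
  unfold Spec_cycle_of_transition
  match deg_from, deg_to with
  | none, none => rfl
  | none, some _ => rfl
  | some _, none => rfl
  | some a, some b => exact key_lemma a b
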